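-- pv_equiv track=rewrite | github.com/guibor/cursearch | cursearch.py | highlight_matches
-- ===== SOURCE A (Python) =====
-- RESET = "\033[0m"
--
-- MATCH_HL = "\033[1;32;4m"  # bold + green + underline for match highlights
--
-- def parse_query_tokens(query):
--     """Split query into non-empty whitespace-separated tokens."""
--     return [t for t in query.split() if t]
--
-- def highlight_matches(text, query, restore=""):
--     """Insert ANSI highlight around matching tokens in text.
--
--     restore is the ANSI code to re-apply after each highlight reset
--     (e.g. DIM so surrounding dim text stays dim).
--     """
--     tokens = parse_query_tokens(query)
--     if not tokens:
--         return text
--     for token in tokens: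
--         if token.islower():
--             lower_text = text.lower()
--             lower_tok = token.lower()
--             parts = []
--             pos = 0
--             while pos < len(text):
--                 idx = lower_text.find(lower_tok, pos)
--                 if idx < 0:
--                     parts.append(text[pos:])
--                     break
--                 parts.append(text[pos:idx])
--                 parts.append(f"{MATCH_HL}{text[idx:idx+len(token)]}{RESET}{restore}")
--                 pos = idx + len(token)
--             text = "".join(parts)
--         else:
--             text = text.replace(token, f"{MATCH_HL}{token}{RESET}{restore}")
--     return text
-- ===== SOURCE B (Python) =====
-- RESET = "\033[0m"
--
-- MATCH_HL = "\033[1;32;4m"  # bold + green + underline for match highlights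
--
-- def highlight_matches(text, query, restore=""):
--     """Insert ANSI highlight around matching tokens in text.
--
--     Single left-to-right character scan per token instead of the
--     find/slice jump loop: at each position either a case-insensitive
--     match of the whole token is taken (and skipped over), or one
--     character is copied.
--     """
--     for token in query.split():
--         if token.islower():
--             n = len(token)
--             out = []
--             i = 0
--             while i + n <= len(text):
--                 if text[i:i + n].lower() == token:
--                     out.append(f"{MATCH_HL}{text[i:i + n]}{RESET}{restore}")
--                     i += n
--                 else:
--                     out.append(text[i])
--                     i += 1
--             out.append(text[i:])
--             text = "".join(out)
--         else:
--             text = text.replace(token, f"{MATCH_HL}{token}{RESET}{restore}")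
--     return text
-- ===== Notes on version B (the rewrite author's own statement) =====
-- stated objective: alternative
-- what changed: The case-insensitive branch's find/slice jump loop over a pre-lowered copy of the text is replaced by a single left-to-right per-character scan that tests the token directly at each position (match: emit highlight and skip, else copy one char); the redundant non-empty filter and the empty-token early return are dropped.
import Mathlib
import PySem

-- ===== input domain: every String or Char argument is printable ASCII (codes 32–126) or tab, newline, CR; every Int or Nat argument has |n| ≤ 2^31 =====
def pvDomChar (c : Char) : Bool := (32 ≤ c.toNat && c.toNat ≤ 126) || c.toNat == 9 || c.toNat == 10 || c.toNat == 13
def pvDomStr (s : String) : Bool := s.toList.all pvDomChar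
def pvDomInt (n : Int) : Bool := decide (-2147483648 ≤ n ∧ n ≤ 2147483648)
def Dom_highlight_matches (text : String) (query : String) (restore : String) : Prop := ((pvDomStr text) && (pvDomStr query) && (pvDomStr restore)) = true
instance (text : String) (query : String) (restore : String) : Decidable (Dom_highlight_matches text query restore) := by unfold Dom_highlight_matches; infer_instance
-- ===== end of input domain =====

-- B replaces the case-insensitive find/slice jump loop by a direct per-character
-- left-to-right scan (alternative decomposition, not claimed faster).


-- ===== PORT A =====
-- shared module constants RESET / MATCH_HL and the f-string "{MATCH_HL}{seg}{RESET}{restore}"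
def pvRESET : List Char := "\x1b[0m".toList
def pvMATCH_HL : List Char := "\x1b[1;32;4m".toList
def pvHl (restore seg : List Char) : List Char := pvMATCH_HL ++ seg ++ pvRESET ++ restore

-- hand port of str.islower (exact on the ASCII domain, where the cased characters
-- are exactly the letters: some cased character exists and none is uppercase)
def pyStrIslower (cs : List Char) : Bool :=
  cs.any PySem.Chars.islower && cs.all (fun c => !PySem.Chars.isupper c)

-- A's inner `while pos < len(text)` find/slice loop; fuel = len(text)+1 - pos steps
-- always suffice (each iteration strictly increases pos for the nonempty tokens
-- split() yields; fuel 0 is unreachable there).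
def hmLoopA (s ls lt tok restore : List Char) (pos : Nat) : Nat → List Char
  | 0 => []
  | fuel+1 =>
    if pos < s.length then
      let idx := PySem.Chars.findFrom ls lt (pos : Int)
      if idx < 0 then
        PySem.List.slice s (some (pos : Int)) none
      else
        PySem.List.slice s (some (pos : Int)) (some idx) ++
        pvHl restore (PySem.List.slice s (some idx) (some (idx + (tok.length : Int)))) ++
        hmLoopA s ls lt tok restore (idx.toNat + tok.length) fuel
    else []

-- body of A's `for token in tokens` loop
def hmTokenA (s tok restore : List Char) : List Char :=
  if pyStrIslower tok then
    hmLoopA s (PySem.Chars.lower s) (PySem.Chars.lower tok) tok restore 0 (s.length + 1)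
  else
    PySem.Chars.replace s tok (pvHl restore tok)

def highlight_matches (text : String) (query : String) (restore : String) : String :=
  let tokens := (PySem.Str.split₀ query).filter (fun t => !t.isEmpty)
  if tokens.isEmpty then text
  else String.ofList (tokens.foldl (fun s t => hmTokenA s t.toList restore.toList) text.toList)

-- ===== PORT B =====
-- B's per-token character scan: `while i + n <= len(text)` — either the token
-- matches case-insensitively at i (take it, skip n) or copy one character.
-- fuel = len(text)+1 suffices (i strictly increases for nonempty tokens).
def hmScanB (s tok restore : List Char) (i : Nat) : Nat → List Char
  | 0 => []
  | fuel+1 =>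
    if i + tok.length ≤ s.length then
      let seg := PySem.List.slice s (some (i : Int)) (some ((i + tok.length : Nat) : Int))
      if PySem.Chars.lower seg = tok then
        pvHl restore seg ++ hmScanB s tok restore (i + tok.length) fuel
      else
        match PySem.List.pyGet? s (i : Int) with  -- text[i]; i < len(text) here
        | some c => c :: hmScanB s tok restore (i + 1) fuel
        | none => []
    else
      PySem.List.slice s (some (i : Int)) none    -- out.append(text[i:])

def highlight_matches_alt (text : String) (query : String) (restore : String) : String :=
  String.ofList ((PySem.Str.split₀ query).foldl
    (fun s t =>
      if pyStrIslower t.toList then hmScanB s t.toList restore.toList 0 (s.length + 1)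
      else PySem.Chars.replace s t.toList (pvHl restore.toList t.toList))
    text.toList)

-- ===== PRECONDITION & SPEC =====
def Spec_highlight_matches (text : String) (query : String) (restore : String) (out : String) : Prop := out = highlight_matches_alt text query restore
instance (text : String) (query : String) (restore : String) (out : String) : Decidable (Spec_highlight_matches text query restore out) := by unfold Spec_highlight_matches; infer_instance

-- ===== CLAIM (what is proved, stated in full; the proofs are below) =====
def Claim_equal_highlight_matches : Prop := ∀ (text : String) (query : String) (restore : String), Dom_highlight_matches text query restore → Spec_highlight_matches text query restore (highlight_matches text query restore)

-- ===== LEMMAS AND PROOFS =====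

-- "B's match test succeeds at position i" (proof-side abbreviation)
def hmHit (s tok : List Char) (i : Nat) : Prop :=
  i + tok.length ≤ s.length ∧
  PySem.Chars.lower (PySem.List.slice s (some (i : Int)) (some ((i + tok.length : Nat) : Int))) = tok

theorem pyStrIslower_lower {tok : List Char} (h : pyStrIslower tok = true) :
    PySem.Chars.lower tok = tok := by
  simp only [pyStrIslower, Bool.and_eq_true, List.all_eq_true] at h
  simp only [PySem.Chars.lower]
  conv_rhs => rw [← List.map_id tok]
  refine List.map_congr_left (fun c hc => ?_)
  have := h.2 c hc
  simp only [Bool.not_eq_true'] at this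
  simp [PySem.Chars.lowerChar, this]

theorem lower_drop (s : List Char) (k : Nat) :
    PySem.Chars.lower (s.drop k) = (PySem.Chars.lower s).drop k := by
  simp [PySem.Chars.lower, List.map_drop]

theorem lower_take (s : List Char) (k : Nat) :
    PySem.Chars.lower (s.take k) = (PySem.Chars.lower s).take k := by
  simp [PySem.Chars.lower, List.map_take]

theorem lower_length (s : List Char) : (PySem.Chars.lower s).length = s.length := by
  simp [PySem.Chars.lower]

theorem hmHit_iff {s tok : List Char} {i : Nat} (htok : tok ≠ [])
    (hlow : PySem.Chars.lower tok = tok) :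
    hmHit s tok i ↔ PySem.Chars.lower tok <+: (PySem.Chars.lower s).drop i := by
  have hn : 1 ≤ tok.length := List.length_pos_iff.mpr htok
  have harith : i + tok.length - i = tok.length := by omega
  constructor
  · rintro ⟨hle, hseg⟩
    rw [List.prefix_iff_eq_take, hlow]
    rw [PySem.List.slice_natCast, harith, lower_take, lower_drop] at hseg
    exact hseg.symm
  · intro hpre
    have hlen := hpre.length_le
    rw [hlow] at hlen hpre
    simp only [List.length_drop, lower_length] at hlen
    have hle : i + tok.length ≤ s.length := by omega
    refine ⟨hle, ?_⟩
    rw [PySem.List.slice_natCast, harith, lower_take, lower_drop]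
    rw [List.prefix_iff_eq_take] at hpre
    exact hpre.symm

-- a hit at i ≥ pos makes (lower tok) an infix of (lower s).drop pos
theorem hit_infix {s tok : List Char} {pos i : Nat} (htok : tok ≠ [])
    (hlow : PySem.Chars.lower tok = tok) (hpi : pos ≤ i) (hh : hmHit s tok i) :
    PySem.Chars.lower tok <:+: (PySem.Chars.lower s).drop pos := by
  have hpre := (hmHit_iff htok hlow).mp hh
  have : (PySem.Chars.lower s).drop i = ((PySem.Chars.lower s).drop pos).drop (i - pos) := by
    rw [List.drop_drop]; congr 1; omega
  rw [this] at hpre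
  exact hpre.isInfix.trans (List.drop_suffix _ _).isInfix

-- fuel exhaustion / past-the-end tail: the scan returns text[i:]
theorem scanB_ge {s tok restore : List Char} {pos : Nat} (htok : tok ≠ [])
    (hpos : s.length ≤ pos) :
    ∀ f, hmScanB s tok restore pos f = s.drop pos := by
  have hn : 1 ≤ tok.length := List.length_pos_iff.mpr htok
  intro f
  cases f with
  | zero => simp [hmScanB, List.drop_eq_nil_of_le hpos]
  | succ f =>
    rw [hmScanB]
    rw [if_neg (by omega)]
    exact PySem.List.slice_from s (by positivity)

-- no hit anywhere at or after pos: the scan copies the tail verbatim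
theorem scanB_nomatch {s tok restore : List Char} (htok : tok ≠ []) :
    ∀ f pos, s.length + 1 ≤ f + pos → (∀ i, pos ≤ i → ¬ hmHit s tok i) →
    hmScanB s tok restore pos f = s.drop pos := by
  have hn : 1 ≤ tok.length := List.length_pos_iff.mpr htok
  intro f
  induction f with
  | zero =>
    intro pos hf _
    rw [hmScanB, (List.drop_eq_nil_of_le (show s.length ≤ pos by omega))]
  | succ f ih =>
    intro pos hf hno
    by_cases hend : pos + tok.length ≤ s.length
    · rw [hmScanB, if_pos hend]
      have hnothit := hno pos le_rfl
      rw [hmHit] at hnothit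
      rw [if_neg (fun hseg => hnothit ⟨hend, hseg⟩)]
      have hlt : pos < s.length := by omega
      rw [PySem.List.pyGet?_natCast, List.getElem?_eq_getElem hlt]
      dsimp only
      have := ih (pos + 1) (by omega) (fun i hi => hno i (by omega))
      rw [this, ← List.drop_eq_getElem_cons hlt]
    · rw [hmScanB, if_neg hend]
      exact PySem.List.slice_from s (by positivity)

-- a hit-free stretch of d characters is copied verbatim
theorem scanB_copy {s tok restore : List Char} (htok : tok ≠ []) :
    ∀ d pos f, pos + d + tok.length ≤ s.length →
    (∀ i, pos ≤ i → i < pos + d → ¬ hmHit s tok i) →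
    hmScanB s tok restore pos (f + d) =
      (s.drop pos).take d ++ hmScanB s tok restore (pos + d) f := by
  have hn : 1 ≤ tok.length := List.length_pos_iff.mpr htok
  intro d
  induction d with
  | zero => intro pos f _ _; simp
  | succ d ih =>
    intro pos f hlen hno
    have hend : pos + tok.length ≤ s.length := by omega
    have hstep : f + (d + 1) = (f + d) + 1 := by omega
    rw [hstep, hmScanB, if_pos hend]
    have hnothit := hno pos le_rfl (by omega)
    rw [hmHit] at hnothit
    rw [if_neg (fun hseg => hnothit ⟨hend, hseg⟩)]
    have hlt : pos < s.length := by omega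
    rw [PySem.List.pyGet?_natCast, List.getElem?_eq_getElem hlt]
    dsimp only
    have hih := ih (pos + 1) f (by omega) (fun i h1 h2 => hno i (by omega) (by omega))
    rw [hih]
    rw [List.drop_eq_getElem_cons hlt, List.take_succ_cons]
    simp only [List.cons_append]
    congr 3
    omega

-- MAIN LEMMA: A's find/slice jump loop equals B's character scan
theorem loopA_eq_scanB {s tok restore : List Char} (htok : tok ≠ [])
    (hlow : PySem.Chars.lower tok = tok) :
    ∀ f1 pos f2, s.length + 1 ≤ f1 + pos → s.length + 1 ≤ f2 + pos →
    hmLoopA s (PySem.Chars.lower s) (PySem.Chars.lower tok) tok restore pos f1 =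
      hmScanB s tok restore pos f2 := by
  have hn : 1 ≤ tok.length := List.length_pos_iff.mpr htok
  intro f1
  induction f1 with
  | zero =>
    intro pos f2 hf1 _
    rw [hmLoopA, scanB_ge htok (by omega), List.drop_eq_nil_of_le (by omega)]
  | succ f1 ih =>
    intro pos f2 hf1 hf2
    by_cases hpos : pos < s.length
    case neg =>
      rw [hmLoopA, if_neg hpos, scanB_ge htok (by omega),
        List.drop_eq_nil_of_le (by omega)]
    case pos =>
    rw [hmLoopA, if_pos hpos]
    have hpk : pos ≤ (PySem.Chars.lower s).length := by rw [lower_length]; omega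
    rw [PySem.Chars.findFrom_natCast _ _ pos hpk]
    set F := PySem.Chars.find ((PySem.Chars.lower s).drop pos) (PySem.Chars.lower tok) with hF
    by_cases hneg : F = -1
    · -- no further occurrence: A appends text[pos:], B copies the tail
      rw [if_pos hneg, if_pos (show (-1 : Int) < 0 by decide),
        PySem.List.slice_from s (by positivity), Int.toNat_natCast]
      rw [scanB_nomatch htok f2 pos hf2]
      intro i hi hh
      exact (PySem.Chars.find_eq_neg_one_iff _ _).mp hneg (hit_infix htok hlow hi hh)
    · -- occurrence at idx = pos + F
      have hF0 : 0 ≤ F := by have := PySem.Chars.neg_one_le_find ((PySem.Chars.lower s).drop pos) (PySem.Chars.lower tok); omega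
      have hFlen : F ≤ ((PySem.Chars.lower s).drop pos).length := by
        have := PySem.Chars.find_le_length ((PySem.Chars.lower s).drop pos) (PySem.Chars.lower tok)
        omega
      obtain ⟨hpre, hmin⟩ := PySem.Chars.find_spec (s := (PySem.Chars.lower s).drop pos)
        (sub := PySem.Chars.lower tok) (by omega)
      rw [← hF] at hpre hmin
      set r := F.toNat with hr
      have hFr : F = (r : Int) := by omega
      have hpre' : PySem.Chars.lower tok <+: (PySem.Chars.lower s).drop (pos + r) := by
        rwa [List.drop_drop] at hpre
      have hrange : pos + r + tok.length ≤ s.length := by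
        have := hpre'.length_le
        rw [hlow] at this
        simp only [List.length_drop, lower_length] at this
        omega
      rw [if_neg hneg, if_neg (show ¬((pos : Int) + F < 0) by omega)]
      -- normalise A's slices
      have hidx : (pos : Int) + F = ((pos + r : Nat) : Int) := by rw [hFr]; push_cast; ring
      have hidx2 : ((pos + r : Nat) : Int) + (tok.length : Int) = ((pos + r + tok.length : Nat) : Int) := by
        push_cast; ring
      rw [hidx, hidx2, PySem.List.slice_natCast, PySem.List.slice_natCast]
      have e1 : pos + r - pos = r := by omega
      have e2 : pos + r + tok.length - (pos + r) = tok.length := by omega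
      rw [e1, e2, Int.toNat_natCast]
      -- B: copy r characters, then take the hit, then recurse
      have hfr : f2 = (f2 - r) + r := by omega
      rw [hfr, scanB_copy htok r pos (f2 - r) hrange ?nohit]
      case nohit =>
        intro i h1 h2 hh
        have := (hmHit_iff htok hlow).mp hh
        have hdrop : (PySem.Chars.lower s).drop i = ((PySem.Chars.lower s).drop pos).drop (i - pos) := by
          rw [List.drop_drop]; congr 1; omega
        rw [hdrop] at this
        exact hmin (i - pos) (by omega) this
      have hfr2 : f2 - r = (f2 - r - 1) + 1 := by omega
      rw [hfr2, hmScanB, if_pos (by omega)]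
      have hseg : PySem.Chars.lower (PySem.List.slice s (some ((pos + r : Nat) : Int))
          (some ((pos + r + tok.length : Nat) : Int))) = tok := by
        rw [PySem.List.slice_natCast, e2, lower_take, lower_drop]
        have h := hpre'
        rw [List.prefix_iff_eq_take, hlow] at h
        exact h.symm
      rw [if_pos hseg]
      have hrec := ih (pos + r + tok.length) (f2 - r - 1) (by omega) (by omega)
      rw [hrec]
      -- both sides now agree up to the slice argument of pvHl and associativity
      rw [PySem.List.slice_natCast, e2]
      simp [List.append_assoc, List.take_drop]

-- every piece produced by Python's str.split() is nonempty
theorem split₀_go_ne_nil :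
    ∀ (s cur : List Char) (acc : List (List Char)), (∀ u ∈ acc, u ≠ ([] : List Char)) →
    ∀ t ∈ PySem.Chars.split₀.go s cur acc, t ≠ [] := by
  intro s
  induction s with
  | nil =>
    intro cur acc hacc t ht
    rw [PySem.Chars.split₀.go] at ht
    by_cases hc : cur.isEmpty
    · rw [if_pos hc] at ht
      exact hacc t (List.mem_reverse.mp ht)
    · rw [if_neg hc] at ht
      rcases List.mem_cons.mp (List.mem_reverse.mp ht) with h | h
      · subst h
        simp only [ne_eq, List.reverse_eq_nil_iff]
        simpa [List.isEmpty_iff] using hc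
      · exact hacc t h
  | cons c rest ih =>
    intro cur acc hacc t ht
    rw [PySem.Chars.split₀.go] at ht
    by_cases hs : PySem.Chars.isspace c
    · rw [if_pos hs] at ht
      by_cases hc : cur.isEmpty
      · rw [if_pos hc] at ht
        exact ih [] acc hacc t ht
      · rw [if_neg hc] at ht
        refine ih [] (cur.reverse :: acc) ?_ t ht
        intro u hu
        rcases List.mem_cons.mp hu with h | h
        · subst h
          simp only [ne_eq, List.reverse_eq_nil_iff]
          simpa [List.isEmpty_iff] using hc
        · exact hacc u h
    · rw [if_neg hs] at ht
      exact ih (c :: cur) acc hacc t ht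

theorem split₀_ne_nil {q : List Char} {t : List Char} (ht : t ∈ PySem.Chars.split₀ q) :
    t ≠ [] := by
  rw [PySem.Chars.split₀] at ht
  exact split₀_go_ne_nil q [] [] (by intro u hu; cases hu) t ht

theorem str_split₀_toList_ne_nil {q : String} {t : String} (ht : t ∈ PySem.Str.split₀ q) :
    t.toList ≠ [] := by
  have : t.toList ∈ List.map String.toList (PySem.Str.split₀ q) := List.mem_map_of_mem ht
  rw [PySem.Str.split₀_map_toList] at this
  exact split₀_ne_nil this

-- the explicit `if t` filter in parse_query_tokens is a no-op
theorem filter_split₀ (q : String) :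
    (PySem.Str.split₀ q).filter (fun t => !t.isEmpty) = PySem.Str.split₀ q := by
  apply List.filter_eq_self.mpr
  intro t ht
  have hne := str_split₀_toList_ne_nil ht
  cases h : t.isEmpty with
  | false => simp
  | true =>
    exfalso
    apply hne
    rw [String.isEmpty_iff] at h
    rw [h]
    rfl

-- per-token agreement for the nonempty tokens split() yields
theorem token_eq (s tok restore : List Char) (htok : tok ≠ []) :
    hmTokenA s tok restore =
      (if pyStrIslower tok then hmScanB s tok restore 0 (s.length + 1)
       else PySem.Chars.replace s tok (pvHl restore tok)) := by
  rw [hmTokenA]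
  by_cases h : pyStrIslower tok
  · rw [if_pos h, if_pos h]
    exact loopA_eq_scanB htok (pyStrIslower_lower h) (s.length + 1) 0 (s.length + 1)
      (by omega) (by omega)
  · rw [if_neg h, if_neg h]

-- ===== VERDICT (by name: the statement is the Claim_ definition above) =====
theorem highlight_matches_spec : Claim_equal_highlight_matches := by
  intro text query restore _
  unfold Spec_highlight_matches highlight_matches highlight_matches_alt
  rw [filter_split₀]
  by_cases hq : (PySem.Str.split₀ query).isEmpty
  · rw [if_pos hq]
    rw [List.isEmpty_iff] at hq
    rw [hq]
    simp
  · rw [if_neg hq]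
    congr 1
    apply PySem.List.foldl_congr_mem
    intro acc t ht
    exact token_eq acc t.toList restore.toList (str_split₀_toList_ne_nil ht)
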